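-- pv_equiv track=rewrite | github.com/ansaraidarbek/week2 | SE-2437/Sarah_Mukhammad/run.py | task7
-- ===== SOURCE A (Python) =====
-- def task7(n: int) -> str:
--     """
--     Count the frequency of each digit in a number.
--     Example: 12234 -> one1two2three1four1
--     Example2: 13235 -> one1two1three2five1
--
--     Parameters:
--     n (int): the input number.
--
--     Returns:
--     str: a string with the frequencies of digits in the format "wordfrequency".
--     """
--     # A mapping of digits to their corresponding English words
--     digit_words = {
--         '0': 'zero', '1': 'one', '2': 'two', '3': 'three', '4': 'four',
--         '5': 'five', '6': 'six', '7': 'seven', '8': 'eight', '9': 'nine'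
--     }
--
--     try:
--         # Convert the number to a string to easily iterate over each digit
--         num_str = str(n)
--
--         # Initialize a dictionary to count the frequency of each digit
--         digit_count = {}
--
--         for digit in num_str:
--             if digit in digit_count:
--                 digit_count[digit] += 1
--             else:
--                 digit_count[digit] = 1
--
--         # Create the result string in the required format
--         result = ""
--         for digit in sorted(digit_count.keys()):
--             result += f"{digit_words[digit]}{digit_count[digit]}"
--
--         return result
--     except Exception as e:
--         return "Error"
-- ===== SOURCE B (Python) =====
-- def task7(n: int) -> str:
--     if n < 0:
--         return 'Error'
--     words = ['zero', 'one', 'two', 'three', 'four', 'five',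
--              'six', 'seven', 'eight', 'nine']
--
--     def runs(ds):
--         # ds is a sorted list of digit characters: emit run-length encoding
--         if not ds:
--             return ''
--         d, rest, k = ds[0], ds[1:], 1
--         while rest and rest[0] == d:
--             k += 1
--             rest = rest[1:]
--         return words[int(d)] + str(k) + runs(rest)
--
--     return runs(sorted(str(n)))
-- ===== Notes on version B (the rewrite author's own statement) =====
-- stated objective: alternative
-- what changed: B replaces A's dictionary frequency counting followed by a key sort with a sort-first strategy: it sorts the digit string and emits word+run-length for each maximal run by a recursive two-pointer scan, never building a counter at all.
import Mathlib
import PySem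

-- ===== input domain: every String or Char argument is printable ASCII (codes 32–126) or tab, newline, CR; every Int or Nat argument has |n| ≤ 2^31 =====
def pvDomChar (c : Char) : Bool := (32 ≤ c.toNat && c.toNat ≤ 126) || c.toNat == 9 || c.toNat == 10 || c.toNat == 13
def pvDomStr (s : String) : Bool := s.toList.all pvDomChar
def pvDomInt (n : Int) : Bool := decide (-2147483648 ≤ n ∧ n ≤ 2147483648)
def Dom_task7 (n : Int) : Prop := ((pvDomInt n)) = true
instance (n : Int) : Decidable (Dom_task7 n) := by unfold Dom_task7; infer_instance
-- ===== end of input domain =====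

-- B replaces A's dictionary counting + key sort by sorting the digit string first and
-- emitting word+run-length per maximal run with a recursive scan (alternative; same cost).

-- ===== PORT A =====
def pvDigitWords : PySem.Dict Char String := PySem.Dict.ofList
  [('0', "zero"), ('1', "one"), ('2', "two"), ('3', "three"), ('4', "four"),
   ('5', "five"), ('6', "six"), ('7', "seven"), ('8', "eight"), ('9', "nine")]

def task7 (n : Int) : String :=
  let numStr := PySem.Int.toChars n
  let digitCount := numStr.foldl (fun d c =>
      if d.contains c then d.insert c (d.getD c 0 + 1) else d.insert c 1)
    PySem.Dict.empty
  -- result loop: digit_words[digit] may raise KeyError (= none here); the except-branch turns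
  -- that into "Error".  digit_count[digit] is read with getD: digit ranges over digit_count's
  -- own keys, so that lookup never raises.
  let result := (PySem.List.sorted digitCount.keys (fun x => x) false).foldl
    (fun (acc : Option String) c =>
      match acc, pvDigitWords.get? c with
      | some r, some w => some (r ++ w ++ PySem.Int.toStr (digitCount.getD c 0))
      | _, _ => none)
    (some "")
  result.getD "Error"

-- ===== PORT B =====
def pvWords : List String :=
  ["zero", "one", "two", "three", "four", "five", "six", "seven", "eight", "nine"]

-- the inner while loop of runs: consume leading copies of d, counting them into k
def pvEat (c : Char) : List Char → Int → Int × List Char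
  | [], k => (k, [])
  | x :: t, k => if x = c then pvEat c t (k + 1) else (k, x :: t)

theorem pvEat_snd_length (c : Char) : ∀ (l : List Char) (k : Int),
    (pvEat c l k).2.length ≤ l.length := by
  intro l
  induction l with
  | nil => intro k; simp [pvEat]
  | cons x t ih =>
    intro k
    by_cases h : x = c
    · simpa [pvEat, h] using (ih (k + 1)).trans (Nat.le_succ _)
    · simp [pvEat, h]

-- the recursive helper `runs` of B: run-length encoding of a sorted digit list.
-- words[int(d)] could raise only on a non-digit char, unreachable under the n < 0 guard;
-- the raising lookups are `none` here, rendered "" (exact wherever runs is reached).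
def pvRuns : List Char → String
  | [] => ""
  | d :: rest =>
    let p := pvEat d rest 1
    ((PySem.Int.ofStr? (String.ofList [d])).bind (fun i => PySem.List.pyGet? pvWords i)).getD ""
      ++ PySem.Int.toStr p.1 ++ pvRuns p.2
termination_by l => l.length
decreasing_by
  simpa using Nat.lt_succ_of_le (pvEat_snd_length d rest 1)

def task7_alt (n : Int) : String :=
  if n < 0 then "Error"
  else pvRuns (PySem.List.sorted (PySem.Int.toChars n) (fun x => x) false)

-- ===== PRECONDITION & SPEC =====
def Spec_task7 (n : Int) (out : String) : Prop := out = task7_alt n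
instance (n : Int) (out : String) : Decidable (Spec_task7 n out) := by unfold Spec_task7; infer_instance

-- ===== CLAIM (what is proved, stated in full; the proofs are below) =====
def Claim_equal_task7 : Prop := ∀ (n : Int), Dom_task7 n → Spec_task7 n (task7 n)

-- ===== LEMMAS AND PROOFS =====

-- the ten digit characters, ascending
def pvDigits : List Char := ['0', '1', '2', '3', '4', '5', '6', '7', '8', '9']

-- the word A's result loop emits for a digit character
def pvWordA (c : Char) : String := (pvDigitWords.get? c).getD ""

theorem pv_digitChar_mem (m : Nat) (h : m < 10) : Nat.digitChar m ∈ pvDigits := by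
  interval_cases m <;> decide

theorem pv_toDigitsCore_mem (f : Nat) : ∀ (m : Nat) (l : List Char),
    (∀ c ∈ l, c ∈ pvDigits) → ∀ c ∈ Nat.toDigitsCore 10 f m l, c ∈ pvDigits := by
  induction f with
  | zero => intro m l hl; simpa [Nat.toDigitsCore] using hl
  | succ f ih =>
    intro m l hl
    simp only [Nat.toDigitsCore]
    split
    · intro c hc
      rcases List.mem_cons.mp hc with h | h
      · subst h; exact pv_digitChar_mem _ (Nat.mod_lt _ (by norm_num))
      · exact hl _ h
    · exact ih _ _ (by
        intro c hc
        rcases List.mem_cons.mp hc with h | h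
        · subst h; exact pv_digitChar_mem _ (Nat.mod_lt _ (by norm_num))
        · exact hl _ h)

theorem pv_toChars_mem (n : Int) (h : 0 ≤ n) : ∀ c ∈ PySem.Int.toChars n, c ∈ pvDigits := by
  unfold PySem.Int.toChars
  rw [if_neg (by omega)]
  exact pv_toDigitsCore_mem _ _ _ (by simp)

-- A's counting loop builds Counter(num_str)
theorem pv_dict_eq_counter (cs : List Char) :
    cs.foldl (fun d c => if d.contains c then d.insert c (d.getD c 0 + 1) else d.insert c 1)
      PySem.Dict.empty = PySem.Dict.counter cs := by
  rw [PySem.List.foldl_congr_mem _ _ (fun d c => d.insert c ((d.getD c 0 : Int) + 1)) _ ?_]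
  · exact PySem.Dict.foldl_insert_getD_add_one_eq_counter cs
  · intro d c _
    by_cases h : d.contains c
    · simp [h]
    · have hg : d.get? c = none :=
        (PySem.Dict.get?_eq_none_iff_contains d c).mpr (by simpa using h)
      have h0 : d.getD c (0 : Int) = 0 := by simp [PySem.Dict.getD, hg]
      simp [h, h0]

-- step of A's result loop, with the count dict fixed
def pvStep (dc : PySem.Dict Char Int) (acc : Option String) (c : Char) : Option String :=
  match acc, pvDigitWords.get? c with
  | some r, some w => some (r ++ w ++ PySem.Int.toStr (dc.getD c 0))
  | _, _ => none

theorem pv_foldl_none (dc : PySem.Dict Char Int) (l : List Char) :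
    l.foldl (pvStep dc) none = none := by
  induction l with
  | nil => rfl
  | cons a t ih => simpa [pvStep] using ih

theorem pv_foldl_bad (dc : PySem.Dict Char Int) (l : List Char) (acc : Option String)
    (h : ∃ k ∈ l, pvDigitWords.get? k = none) : l.foldl (pvStep dc) acc = none := by
  induction l generalizing acc with
  | nil => simp at h
  | cons a t ih =>
    rcases h with ⟨k, hk, hnone⟩
    rcases List.mem_cons.mp hk with rfl | hk'
    · have hs : pvStep dc acc k = none := by
        unfold pvStep; rw [hnone]; rcases acc <;> rfl
      simp only [List.foldl_cons, hs, pv_foldl_none]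
    · exact ih _ ⟨k, hk', hnone⟩

theorem pv_foldl_good (dc : PySem.Dict Char Int) (l : List Char) (r : String)
    (h : ∀ c ∈ l, (pvDigitWords.get? c).isSome) :
    l.foldl (pvStep dc) (some r) =
      some (l.foldl (fun a c =>
        a ++ (pvWordA c ++ PySem.Int.toStr (dc.getD c 0))) r) := by
  induction l generalizing r with
  | nil => rfl
  | cons a t ih =>
    have ha := h a (by simp)
    rcases hw : pvDigitWords.get? a with _ | w
    · rw [hw] at ha; simp at ha
    · simp only [List.foldl_cons]
      have hstep : pvStep dc (some r) a = some (r ++ w ++ PySem.Int.toStr (dc.getD a 0)) := by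
        unfold pvStep; rw [hw]
      rw [hstep, ih _ (fun c hc => h c (by simp [hc]))]
      simp [pvWordA, hw, String.append_assoc]

theorem pv_foldl_toList (f : Char → String) (l : List Char) (r : String) :
    (l.foldl (fun a c => a ++ f c) r).toList
      = r.toList ++ (l.map (fun c => (f c).toList)).flatten := by
  induction l generalizing r with
  | nil => simp
  | cons a t ih => simp [ih, String.toList_append]

-- pvEat is takeWhile/dropWhile
theorem pvEat_eq (c : Char) : ∀ (l : List Char) (k : Int),
    pvEat c l k = (k + ((l.takeWhile (· == c)).length : Int), l.dropWhile (· == c)) := by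
  intro l
  induction l with
  | nil => intro k; simp [pvEat]
  | cons x t ih =>
    intro k
    by_cases h : x = c
    · rw [show pvEat c (x :: t) k = pvEat c t (k + 1) by simp [pvEat, h]]
      rw [ih]
      simp [List.takeWhile_cons, List.dropWhile_cons, h]
      ring
    · simp [pvEat, h, List.takeWhile_cons, List.dropWhile_cons]

-- B's word lookup agrees with A's on every digit character
theorem pv_word_agree (c : Char) (hc : c ∈ pvDigits) :
    ((PySem.Int.ofStr? (String.ofList [c])).bind (fun i => PySem.List.pyGet? pvWords i)).getD ""
      = pvWordA c := by
  fin_cases hc <;> decide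

-- main B lemma: on a ≤-sorted list of digit characters, runs produces exactly
-- word + count for each digit present, in ascending digit order
theorem pv_runs_spec : ∀ (N : Nat) (t : List Char), t.length ≤ N →
    t.Pairwise (· ≤ ·) → (∀ c ∈ t, c ∈ pvDigits) →
    (pvRuns t).toList =
      ((pvDigits.filter (fun c => decide (c ∈ t))).map
        (fun c => (pvWordA c ++ PySem.Int.toStr ((t.count c : Nat) : Int)).toList)).flatten := by
  intro N
  induction N with
  | zero =>
    intro t ht _ _
    have : t = [] := List.eq_nil_of_length_eq_zero (Nat.le_zero.mp ht)
    subst this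
    simp [pvRuns]
  | succ N ih =>
    intro t ht hsorted hdig
    cases t with
    | nil => simp [pvRuns]
    | cons d rest =>
      have hdmem : d ∈ pvDigits := hdig d (by simp)
      have hrest_le : ∀ x ∈ rest, d ≤ x := fun x hx => (List.pairwise_cons.mp hsorted).1 x hx
      have hrest_sorted : rest.Pairwise (· ≤ ·) := (List.pairwise_cons.mp hsorted).2
      set m := (rest.takeWhile (· == d)).length with hm
      set rest' := rest.dropWhile (· == d) with hr'
      have hsplit : rest = rest.takeWhile (· == d) ++ rest' := (List.takeWhile_append_dropWhile).symm
      have htake : rest.takeWhile (· == d) = List.replicate m d := by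
        rw [List.eq_replicate_iff]
        refine ⟨rfl, fun b hb => ?_⟩
        have := List.mem_takeWhile_imp hb
        simpa using this
      -- every element of rest' is strictly greater than d
      have hgt : ∀ x ∈ rest', d < x := by
        intro x hx
        cases hre : rest' with
        | nil => rw [hre] at hx; simp at hx
        | cons a tl =>
          have hanep : ¬ (a == d) = true := by
            have := List.head?_dropWhile_not (· == d) rest
            rw [← hr', hre] at this
            simpa using this
          have hane : a ≠ d := by simpa using hanep
          have hamem : a ∈ rest := by
            rw [hsplit, hre]; simp
          have hda : d < a := lt_of_le_of_ne (hrest_le a hamem) (Ne.symm hane)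
          rw [hre] at hx
          rcases List.mem_cons.mp hx with rfl | hx'
          · exact hda
          · have hsorted' : (a :: tl).Pairwise (· ≤ ·) := by
              have hsub : List.Sublist rest' rest := List.dropWhile_sublist _
              rw [hre] at hsub
              exact hrest_sorted.sublist hsub
            exact hda.trans_le ((List.pairwise_cons.mp hsorted').1 x hx')
      have hdnot : d ∉ rest' := fun h => lt_irrefl d (hgt d h)
      -- unfold one step of pvRuns
      have hstep : pvRuns (d :: rest) =
          ((PySem.Int.ofStr? (String.ofList [d])).bind (fun i => PySem.List.pyGet? pvWords i)).getD ""
            ++ PySem.Int.toStr (1 + (m : Int)) ++ pvRuns rest' := by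
        rw [pvRuns]
        rw [pvEat_eq]
      -- counts
      have hcountd : (d :: rest).count d = 1 + m := by
        rw [hsplit, htake]
        simp [List.count_cons, List.count_append, List.count_replicate,
          List.count_eq_zero_of_not_mem hdnot]
        omega
      have hcount' : ∀ c ∈ rest', (d :: rest).count c = rest'.count c := by
        intro c hc
        have hcd : c ≠ d := fun h => hdnot (h ▸ hc)
        have hdc : d ≠ c := fun h => hcd h.symm
        rw [hsplit, htake]
        simp [List.count_cons, List.count_append, List.count_replicate, hdc]
      -- the filter splits
      have hfilter : pvDigits.filter (fun c => decide (c ∈ d :: rest))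
          = d :: pvDigits.filter (fun c => decide (c ∈ rest')) := by
        have hmemt : ∀ c, c ∈ d :: rest ↔ c = d ∨ c ∈ rest' := by
          intro c
          constructor
          · intro hc
            rcases List.mem_cons.mp hc with rfl | hc'
            · exact Or.inl rfl
            · rw [hsplit] at hc'
              rcases List.mem_append.mp hc' with h1 | h2
              · rw [htake] at h1
                exact Or.inl (List.eq_of_mem_replicate h1)
              · exact Or.inr h2
          · rintro (rfl | hc)
            · simp
            · rw [List.mem_cons, hsplit]
              exact Or.inr (List.mem_append.mpr (Or.inr hc))
        refine List.Perm.eq_of_pairwise' (r := fun (a b : Char) => a ≤ b)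
          ((( by decide : pvDigits.Pairwise (· < ·)).filter _).imp le_of_lt) ?_ ?_
        · refine List.pairwise_cons.mpr ⟨?_, ((by decide : pvDigits.Pairwise (· < ·)).filter _).imp le_of_lt⟩
          intro c hc
          exact (hgt c (by simpa using (List.mem_filter.mp hc).2)).le
        · rw [List.perm_ext_iff_of_nodup]
          · intro c
            simp only [List.mem_filter, decide_eq_true_eq, List.mem_cons, hmemt]
            constructor
            · rintro ⟨hcd, rfl | hc⟩
              · exact Or.inl rfl
              · exact Or.inr ⟨hcd, hc⟩
            · rintro (rfl | ⟨hcd, hc⟩)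
              · exact ⟨hdmem, Or.inl rfl⟩
              · exact ⟨hcd, Or.inr hc⟩
          · exact (by decide : pvDigits.Nodup).filter _
          · refine List.nodup_cons.mpr ⟨?_, (by decide : pvDigits.Nodup).filter _⟩
            intro h
            exact hdnot (by simpa using (List.mem_filter.mp h).2)
      -- lengths for the IH
      have hlen : rest'.length ≤ N := by
        have h1 : rest'.length ≤ rest.length := List.length_dropWhile_le _ _
        have h2 : rest.length + 1 ≤ N + 1 := by simpa using ht
        omega
      have hsub : List.Sublist rest' rest := List.dropWhile_sublist _
      have IH := ih rest' hlen (hrest_sorted.sublist hsub)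
        (fun c hc => hdig c (List.mem_cons.mpr (Or.inr (hsub.mem hc))))
      rw [hstep, hfilter]
      simp only [List.map_cons, List.flatten_cons, String.toList_append]
      rw [pv_word_agree d hdmem, IH]
      congr 2
      · rw [hcountd]; push_cast; ring_nf
      · apply List.map_congr_left
        intro c hc
        rw [hcount' c (by simpa using (List.mem_filter.mp hc).2)]
        simp [String.toList_append]

theorem task7_spec_aux (n : Int) : task7 n = task7_alt n := by
  by_cases hn : n < 0
  · -- negative: '-' is in the keys, digit_words['-'] raises, A returns "Error"; B's guard fires
    simp only [task7, task7_alt]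
    rw [if_pos hn]
    rw [pv_dict_eq_counter]
    rw [show (fun (acc : Option String) c =>
      match acc, pvDigitWords.get? c with
      | some r, some w => some (r ++ w ++
          PySem.Int.toStr ((PySem.Dict.counter (PySem.Int.toChars n)).getD c 0))
      | _, _ => none) = pvStep (PySem.Dict.counter (PySem.Int.toChars n)) from rfl]
    rw [pv_foldl_bad _ _ _ ?_]
    · rfl
    · refine ⟨'-', ?_, by decide⟩
      rw [PySem.List.mem_sorted, PySem.Dict.keys_counter, PySem.Set.mem_ofList]
      unfold PySem.Int.toChars
      rw [if_pos hn]
      exact List.mem_cons_self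
  · -- non-negative: every char of str(n) is a digit
    have hge : (0 : Int) ≤ n := not_lt.mp hn
    have hmem := pv_toChars_mem n hge
    simp only [task7, task7_alt]
    rw [if_neg hn, pv_dict_eq_counter, PySem.Dict.keys_counter]
    set t0 := PySem.Int.toChars n with ht0
    set t := PySem.List.sorted t0 (fun x => x) false with htdef
    -- A side: fold over the sorted distinct keys
    have hskeys : PySem.List.sorted (PySem.Set.ofList t0) (fun x => x) false
        = pvDigits.filter (fun c => decide (c ∈ t0)) := by
      apply PySem.List.sorted_eq_of_perm_of_pairwise_lt
      · rw [List.perm_ext_iff_of_nodup ((by decide : pvDigits.Nodup).filter _)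
          (PySem.Set.nodup_ofList _)]
        intro a
        simp only [List.mem_filter, PySem.Set.mem_ofList, decide_eq_true_eq]
        exact ⟨fun h => h.2, fun h => ⟨hmem a h, h⟩⟩
      · exact (show pvDigits.Pairwise (· < ·) by decide).filter _
    rw [hskeys]
    rw [show (fun (acc : Option String) c =>
      match acc, pvDigitWords.get? c with
      | some r, some w => some (r ++ w ++
          PySem.Int.toStr ((PySem.Dict.counter t0).getD c 0))
      | _, _ => none) = pvStep (PySem.Dict.counter t0) from rfl]
    rw [pv_foldl_good _ _ _ ?_]
    · rw [Option.getD_some]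
      -- B side via pv_runs_spec
      have hts : t.Pairwise (· ≤ ·) := by
        simpa using PySem.List.sorted_pairwise t0 (fun x => x)
      have htd : ∀ c ∈ t, c ∈ pvDigits := by
        intro c hc
        exact hmem c ((PySem.List.mem_sorted _ _ _ _).mp hc)
      have hperm : t.Perm t0 := PySem.List.sorted_perm t0 (fun x => x) false
      apply String.toList_inj.mp
      rw [pv_foldl_toList, pv_runs_spec t.length t le_rfl hts htd]
      rw [show ("" : String).toList = [] from rfl, List.nil_append]
      have hfeq : pvDigits.filter (fun c => decide (c ∈ t))
          = pvDigits.filter (fun c => decide (c ∈ t0)) := by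
        apply List.filter_congr
        intro c _
        simp [PySem.List.mem_sorted, htdef]
      rw [hfeq]
      apply congrArg List.flatten
      apply List.map_congr_left
      intro c _
      rw [PySem.Dict.getD_counter, hperm.count_eq]
    · intro c hc
      have hcd := List.mem_of_mem_filter hc
      fin_cases hcd <;> decide

-- ===== VERDICT =====
theorem task7_spec : Claim_equal_task7 := by
  intro n _
  unfold Spec_task7
  exact task7_spec_aux n
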